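-- pv_equiv track=rewrite | github.com/sung01299/algo-kr | string/4659.py | check_3_vowels
-- ===== SOURCE A (Python) =====
-- vowels = {'a', 'e', 'i', 'o', 'u'}
--
-- def check_3_vowels(s):
--     cnt = 0
--     for c in s[:-1]:
--         if c in vowels:
--             cnt += 1
--             if cnt >= 3:
--                 return False
--         else:
--             cnt = 0
--     return True
-- ===== SOURCE B (Python) =====
-- vowels = {'a', 'e', 'i', 'o', 'u'}
--
-- def check_3_vowels(s):
--     t = s[:-1]
--     return not any(a in vowels and b in vowels and c in vowels
--                    for a, b, c in zip(t, t[1:], t[2:]))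
-- ===== Notes on version B (the rewrite author's own statement) =====
-- stated objective: idiomatic
-- what changed: Replaced the resettable running vowel counter with a stateless sliding-window test: zip the prefix with its two shifts and ask whether any length-3 window is all vowels.
import Mathlib
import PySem

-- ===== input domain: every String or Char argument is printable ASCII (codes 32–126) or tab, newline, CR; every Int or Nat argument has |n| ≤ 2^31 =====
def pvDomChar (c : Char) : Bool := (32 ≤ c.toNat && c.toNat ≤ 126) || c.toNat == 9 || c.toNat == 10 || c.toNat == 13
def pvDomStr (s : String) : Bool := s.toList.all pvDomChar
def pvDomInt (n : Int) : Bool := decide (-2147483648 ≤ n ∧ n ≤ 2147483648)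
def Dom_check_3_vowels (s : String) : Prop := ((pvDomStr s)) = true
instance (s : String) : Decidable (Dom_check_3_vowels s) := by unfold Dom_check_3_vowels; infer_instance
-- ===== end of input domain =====

-- B replaces A's resettable running counter by a stateless sliding-window any-test (idiomatic; same cost).

-- ===== PORT A =====
-- module constant: vowels = {'a','e','i','o','u'}
def pvVowels : List Char := ['a', 'e', 'i', 'o', 'u']

-- the for-loop over s[:-1] with the counter, early return False as result false
def pvALoop : List Char → Int → Bool
  | [], _ => true
  | c :: rest, cnt =>
    if c ∈ pvVowels then
      if cnt + 1 ≥ 3 then false else pvALoop rest (cnt + 1)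
    else pvALoop rest 0

def check_3_vowels (s : String) : Bool :=
  pvALoop (PySem.List.slice s.toList none (some (-1))) 0

-- ===== PORT B =====
def check_3_vowels_alt (s : String) : Bool :=
  let t := PySem.List.slice s.toList none (some (-1))
  -- not any(... for a,b,c in zip(t, t[1:], t[2:]))
  !((t.zip ((t.drop 1).zip (t.drop 2))).any
      (fun x => x.1 ∈ pvVowels && x.2.1 ∈ pvVowels && x.2.2 ∈ pvVowels))

-- ===== PRECONDITION & SPEC =====
def Spec_check_3_vowels (s : String) (out : Bool) : Prop := out = check_3_vowels_alt s
instance (s : String) (out : Bool) : Decidable (Spec_check_3_vowels s out) := by unfold Spec_check_3_vowels; infer_instance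

-- ===== CLAIM (what is proved, stated in full; the proofs are below) =====
def Claim_equal_check_3_vowels : Prop := ∀ (s : String), Dom_check_3_vowels s → Spec_check_3_vowels s (check_3_vowels s)

-- ===== LEMMAS AND PROOFS =====
def pvWin (l : List Char) : Bool :=
  (l.zip ((l.drop 1).zip (l.drop 2))).any
    (fun x => x.1 ∈ pvVowels && x.2.1 ∈ pvVowels && x.2.2 ∈ pvVowels)

def pvHv : List Char → Bool
  | c :: _ => c ∈ pvVowels
  | [] => false

def pvPair : List Char → Bool
  | a :: b :: _ => (a ∈ pvVowels) && (b ∈ pvVowels)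
  | _ => false

theorem pvWin_cons (c : Char) (rest : List Char) :
    pvWin (c :: rest) = ((decide (c ∈ pvVowels) && pvPair rest) || pvWin rest) := by
  match rest with
  | [] => simp [pvWin, pvPair]
  | [b] => simp [pvWin, pvPair, List.zip]
  | b :: d :: r => simp [pvWin, pvPair, List.zip, Bool.and_assoc]

theorem pvHv_cons (c : Char) (rest : List Char) :
    pvHv (c :: rest) = decide (c ∈ pvVowels) := rfl

theorem pvPair_cons (c : Char) (rest : List Char) :
    pvPair (c :: rest) = (decide (c ∈ pvVowels) && pvHv rest) := by
  cases rest <;> simp [pvPair, pvHv]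

theorem pvPair_hv (l : List Char) : pvPair l = true → pvHv l = true := by
  cases l with
  | nil => simp [pvPair]
  | cons c t => rw [pvPair_cons]; simp [pvHv]; intro h _; exact h

theorem pvMain (l : List Char) :
    pvALoop l 0 = !pvWin l
    ∧ pvALoop l 1 = !(pvWin l || pvPair l)
    ∧ pvALoop l 2 = !(pvWin l || pvHv l) := by
  induction l with
  | nil => simp [pvALoop, pvWin, pvPair, pvHv]
  | cons c rest ih =>
    obtain ⟨ih0, ih1, ih2⟩ := ih
    have hpi := pvPair_hv rest
    by_cases hv : c ∈ pvVowels
    · refine ⟨?_, ?_, ?_⟩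
      · simp [pvALoop, hv, ih1, pvWin_cons, Bool.or_comm]
      · simp [pvALoop, hv, ih2, pvWin_cons, pvPair_cons]
        cases hp : pvPair rest <;> cases hh : pvHv rest <;> simp_all
      · simp [pvALoop, hv, pvWin_cons, pvHv_cons]
    · refine ⟨?_, ?_, ?_⟩
      · simp [pvALoop, hv, ih0, pvWin_cons]
      · simp [pvALoop, hv, ih0, pvWin_cons, pvPair_cons]
      · simp [pvALoop, hv, ih0, pvWin_cons, pvHv_cons]

-- ===== VERDICT =====
theorem check_3_vowels_spec : Claim_equal_check_3_vowels := by
  intro s _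
  unfold Spec_check_3_vowels check_3_vowels check_3_vowels_alt
  exact (pvMain _).1
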